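-- pv_equiv track=rewrite | github.com/Cruellest/painel_pj | services/text_normalizer/utils.py | find_repeated_lines
-- ===== SOURCE A (Python) =====
-- from typing import List, Dict, Tuple
-- from collections import Counter
--
-- def find_repeated_lines(lines: List[str], min_occurrences: int = 3) -> set:
--     """
--     Encontra linhas que aparecem múltiplas vezes (candidatas a header/footer).
--
--     Args:
--         lines: Lista de linhas do texto
--         min_occurrences: Mínimo de ocorrências para considerar repetida
--
--     Returns:
--         Set com linhas repetidas
--     """
--     # Filtra linhas muito curtas ou muito longas
--     valid_lines = [
--         line.strip()
--         for line in lines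
--         if 5 <= len(line.strip()) <= 100
--     ]
--
--     # Conta ocorrências
--     counter = Counter(valid_lines)
--
--     # Retorna linhas com ocorrências >= min_occurrences
--     return {
--         line for line, count in counter.items()
--         if count >= min_occurrences
--     }
-- ===== SOURCE B (Python) =====
-- def find_repeated_lines(lines, min_occurrences=3):
--     # Same filter as A: keep stripped lines with 5 <= len <= 100
--     valid_lines = [
--         line.strip()
--         for line in lines
--         if 5 <= len(line.strip()) <= 100
--     ]
--     # No Counter: sort a copy, then run-length-scan the sorted list to get
--     # each distinct line's multiplicity.
--     ordered = sorted(valid_lines)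
--     counts = {}
--     n = len(ordered)
--     i = 0
--     while i < n:
--         j = i
--         while j < n and ordered[j] == ordered[i]:
--             j += 1
--         counts[ordered[i]] = j - i
--         i = j
--     return {s for s in valid_lines if counts[s] >= min_occurrences}
-- ===== Notes on version B (the rewrite author's own statement) =====
-- stated objective: alternative
-- what changed: Replaces the Counter hash map by sorting the valid lines and run-length scanning the sorted copy to obtain each line's multiplicity, then collecting lines whose run length reaches the threshold.
import Mathlib
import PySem

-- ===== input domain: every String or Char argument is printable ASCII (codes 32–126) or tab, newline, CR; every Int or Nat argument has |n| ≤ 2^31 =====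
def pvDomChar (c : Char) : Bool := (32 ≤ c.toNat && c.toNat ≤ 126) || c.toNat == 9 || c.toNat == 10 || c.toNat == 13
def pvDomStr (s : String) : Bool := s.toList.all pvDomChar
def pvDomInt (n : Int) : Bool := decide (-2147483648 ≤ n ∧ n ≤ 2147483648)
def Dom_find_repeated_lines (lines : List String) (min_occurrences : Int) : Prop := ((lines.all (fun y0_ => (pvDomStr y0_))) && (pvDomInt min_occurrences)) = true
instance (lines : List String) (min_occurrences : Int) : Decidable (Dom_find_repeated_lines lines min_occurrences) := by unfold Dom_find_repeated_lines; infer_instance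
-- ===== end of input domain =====

-- B (alternative): counts by sorting the valid lines and run-length scanning the
-- sorted copy instead of building a Counter hash map; same return value everywhere.

-- shared helper: both Pythons build valid_lines with the identical comprehension
-- [line.strip() for line in lines if 5 <= len(line.strip()) <= 100]
-- (the guard reads only the stripped value, so it is filter-after-map of strip)
def pvValid (lines : List String) : List String :=
  (lines.map PySem.Str.strip).filter
    (fun s => decide (5 ≤ PySem.Str.len s ∧ PySem.Str.len s ≤ 100))

-- ===== PORT A =====
def find_repeated_lines (lines : List String) (min_occurrences : Int) : List String :=
  let valid_lines := pvValid lines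
  let counter := PySem.Dict.counter valid_lines
  counter.items.foldl
    (fun acc kc => if min_occurrences ≤ kc.2 then PySem.Set.add acc kc.1 else acc)
    PySem.Set.empty

-- ===== PORT B =====
-- B's while loop over the sorted list: each outer step consumes one run
-- (ordered[i..j) of equal lines) and records its length, then jumps to j.
def pvRunCounts : List String → PySem.Dict String Int → PySem.Dict String Int
  | [], counts => counts
  | x :: rest, counts =>
      pvRunCounts (rest.dropWhile (fun y => y == x))
        (counts.insert x (1 + ((rest.takeWhile (fun y => y == x)).length : Int)))
  termination_by l _ => l.length
  decreasing_by
    simpa using Nat.lt_succ_of_le (List.length_dropWhile_le (fun y => y == x) rest)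

def find_repeated_lines_alt (lines : List String) (min_occurrences : Int) : List String :=
  let valid_lines := pvValid lines
  let ordered := PySem.List.sorted valid_lines (fun s => s) false
  let counts := pvRunCounts ordered PySem.Dict.empty
  -- counts[s]: the key is always present (ordered is a permutation of
  -- valid_lines, proved below), so getD's default is never read
  valid_lines.foldl
    (fun acc s => if min_occurrences ≤ counts.getD s 0 then PySem.Set.add acc s else acc)
    PySem.Set.empty

-- ===== PRECONDITION & SPEC =====
def Spec_find_repeated_lines (lines : List String) (min_occurrences : Int) (out : List String) : Prop := out = find_repeated_lines_alt lines min_occurrences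
instance (lines : List String) (min_occurrences : Int) (out : List String) : Decidable (Spec_find_repeated_lines lines min_occurrences out) := by unfold Spec_find_repeated_lines; infer_instance

-- ===== CLAIM (what is proved, stated in full; the proofs are below) =====
def Claim_equal_find_repeated_lines : Prop := ∀ (lines : List String) (min_occurrences : Int), Dom_find_repeated_lines lines min_occurrences → Spec_find_repeated_lines lines min_occurrences (find_repeated_lines lines min_occurrences)

-- ===== LEMMAS AND PROOFS =====

-- filtering commutes with Python-set deduplication (first occurrences kept)
theorem pv_filter_update {α : Type} [BEq α] [LawfulBEq α] (p : α → Bool) (xs : List α) :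
    ∀ acc : List α, (PySem.Set.update acc xs).filter p
      = PySem.Set.update (acc.filter p) (xs.filter p) := by
  induction xs with
  | nil => intro acc; simp [PySem.Set.update]
  | cons x xs ih =>
    intro acc
    have hstep : PySem.Set.update acc (x :: xs) = PySem.Set.update (PySem.Set.add acc x) xs := rfl
    have hfil : (x :: xs).filter p
        = if p x then x :: xs.filter p else xs.filter p := by
      by_cases hp : p x = true <;> simp [hp]
    have hadd : (PySem.Set.add acc x).filter p = if p x then PySem.Set.add (acc.filter p) x else acc.filter p := by
      by_cases hp : p x = true <;> by_cases hm : x ∈ acc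
      · have hmf : x ∈ acc.filter p := List.mem_filter.mpr ⟨hm, hp⟩
        simp [PySem.Set.add, PySem.Set.contains, hm, hp, hmf]
      · have hmf : x ∉ acc.filter p := fun h => hm (List.mem_of_mem_filter h)
        simp [PySem.Set.add, PySem.Set.contains, hm, hp, hmf, List.filter_append]
      · simp [PySem.Set.add, PySem.Set.contains, hm, hp]
      · simp [PySem.Set.add, PySem.Set.contains, hm, hp, List.filter_append]
    rw [hstep, ih (PySem.Set.add acc x), hadd, hfil]
    by_cases hp : p x = true
    · simp only [hp, if_pos]
      rfl
    · simp [hp]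

theorem pv_ofList_filter {α : Type} [BEq α] [LawfulBEq α] (p : α → Bool) (xs : List α) :
    PySem.Set.ofList (xs.filter p) = (PySem.Set.ofList xs).filter p := by
  have h := pv_filter_update p xs []
  simpa [PySem.Set.update_nil_left] using h.symm

-- the conditional-add loop is the Set.ofList of the filtered list
theorem pv_foldl_if_add {α : Type} [BEq α] (q : α → Prop) [DecidablePred q] (xs : List α) :
    xs.foldl (fun acc s => if q s then PySem.Set.add acc s else acc) PySem.Set.empty
      = PySem.Set.ofList (xs.filter (fun s => decide (q s))) := by
  rw [PySem.Set.ofList_eq_foldl, List.foldl_filter]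
  simp only [decide_eq_true_eq]
  rfl

-- on a ≤-sorted list the run-length loop records exactly each line's count
theorem pv_runCounts_getD : ∀ (n : Nat) (l : List String), l.length ≤ n →
    l.Pairwise (· ≤ ·) → ∀ (d : PySem.Dict String Int) (s : String),
    (pvRunCounts l d).getD s 0
      = if s ∈ l then ((l.count s : Nat) : Int) else d.getD s 0 := by
  intro n
  induction n with
  | zero =>
    intro l hl _ d s
    have hnil : l = [] := List.eq_nil_of_length_eq_zero (Nat.le_zero.mp hl)
    subst hnil
    rw [pvRunCounts]
    simp
  | succ n ih =>
    intro l hl hp d s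
    rcases l with _ | ⟨x, rest⟩
    · rw [pvRunCounts]
      simp
    · obtain ⟨hxle, hrp⟩ := List.pairwise_cons.mp hp
      have hsplit : rest.takeWhile (fun y => y == x) ++ rest.dropWhile (fun y => y == x) = rest :=
        List.takeWhile_append_dropWhile
      have hrun_all : ∀ y ∈ rest.takeWhile (fun y => y == x), y = x := by
        intro y hy
        exact eq_of_beq (List.mem_takeWhile_imp (p := fun z => z == x) (l := rest) hy)
      have hr'p : (rest.dropWhile (fun y => y == x)).Pairwise (· ≤ ·) :=
        List.Pairwise.sublist (List.dropWhile_sublist _) hrp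
      -- x does not occur past its run: the first remaining line is ≠ x yet
      -- squeezed between x and any later occurrence of x
      have hxnot : x ∉ rest.dropWhile (fun y => y == x) := by
        intro hxmem
        rcases hE : rest.dropWhile (fun y => y == x) with _ | ⟨h, t⟩
        · rw [hE] at hxmem
          simp at hxmem
        · have hh : (h == x) = false := by
            have hq := List.head?_dropWhile_not (fun y => y == x) rest
            rw [hE] at hq
            simpa using hq
          have hhne : h ≠ x := by simpa using hh
          have hhx : x ≤ h := hxle h ((List.dropWhile_sublist _).subset (by rw [hE]; simp))
          rw [hE] at hxmem
          rcases List.mem_cons.mp hxmem with he | ht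
          · exact hhne he.symm
          · have hxh : h ≤ x := by
              rw [hE] at hr'p
              exact (List.pairwise_cons.mp hr'p).1 x ht
            exact hhne (le_antisymm hxh hhx)
      have hlen : (rest.dropWhile (fun y => y == x)).length ≤ n := by
        have h1 := List.length_dropWhile_le (fun y => y == x) rest
        have h2 : rest.length + 1 ≤ n + 1 := by simpa using hl
        omega
      rw [pvRunCounts, ih _ hlen hr'p]
      by_cases hs : s = x
      · subst hs
        have hcr : (rest.takeWhile (fun y => y == s)).count s
            = (rest.takeWhile (fun y => y == s)).length :=
          List.count_eq_length.mpr (fun b hb => (hrun_all b hb).symm)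
        have hcr' : (rest.dropWhile (fun y => y == s)).count s = 0 :=
          List.count_eq_zero.mpr hxnot
        have hcount : (s :: rest).count s
            = (rest.takeWhile (fun y => y == s)).length + 1 := by
          rw [List.count_cons, ← hsplit, List.count_append, hcr, hcr']
          simp
        rw [if_neg hxnot, if_pos List.mem_cons_self, PySem.Dict.getD_insert, if_pos rfl, hcount]
        push_cast
        ring
      · have hsrun : s ∉ rest.takeWhile (fun y => y == x) := fun h => hs (hrun_all s h)
        have hcrun : (rest.takeWhile (fun y => y == x)).count s = 0 :=
          List.count_eq_zero.mpr hsrun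
        have hmem : s ∈ x :: rest ↔ s ∈ rest.dropWhile (fun y => y == x) := by
          constructor
          · intro h
            rcases List.mem_cons.mp h with he | hr
            · exact absurd he hs
            · rcases List.mem_append.mp (hsplit ▸ hr) with h1 | h2
              · exact absurd (hrun_all s h1) hs
              · exact h2
          · intro h
            exact List.mem_cons.mpr (Or.inr (hsplit ▸ List.mem_append.mpr (Or.inr h)))
        have hcount : (x :: rest).count s = (rest.dropWhile (fun y => y == x)).count s := by
          rw [List.count_cons, ← hsplit, List.count_append, hcrun]
          simp [beq_iff_eq, Ne.symm hs]
        by_cases hm : s ∈ rest.dropWhile (fun y => y == x)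
        · rw [if_pos hm, if_pos (hmem.mpr hm), hcount]
        · rw [if_neg hm, if_neg (fun h => hm (hmem.mp h)), PySem.Dict.getD_insert, if_neg hs]

-- ===== VERDICT (by name: the statement is the Claim_ definition above) =====
theorem find_repeated_lines_spec : Claim_equal_find_repeated_lines := by
  intro lines m _
  unfold Spec_find_repeated_lines find_repeated_lines find_repeated_lines_alt
  simp only [PySem.Dict.items_counter, List.foldl_map]
  set v := pvValid lines with hv
  set ordered := PySem.List.sorted v (fun s => s) false with hord
  -- B's count lookup on members of v is the plain count in v
  have hcong : v.foldl
      (fun acc s => if m ≤ (pvRunCounts ordered PySem.Dict.empty).getD s 0 then PySem.Set.add acc s else acc)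
      PySem.Set.empty
      = v.foldl (fun acc s => if m ≤ ((v.count s : Nat) : Int) then PySem.Set.add acc s else acc)
      PySem.Set.empty := by
    apply PySem.List.foldl_congr_mem
    intro acc s hsv
    have hmem : s ∈ ordered := (PySem.List.mem_sorted v (fun s => s) false s).mpr hsv
    have hpair : ordered.Pairwise (· ≤ ·) := by
      simpa using PySem.List.sorted_pairwise v (fun s => s)
    have hcnt : ordered.count s = v.count s :=
      (PySem.List.sorted_perm v (fun s => s) false).count_eq s
    rw [pv_runCounts_getD ordered.length ordered le_rfl hpair, if_pos hmem, hcnt]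
  rw [hcong]
  rw [pv_foldl_if_add (fun s => m ≤ ((v.count s : Nat) : Int)) v,
      pv_foldl_if_add (fun k => m ≤ ((v.count k : Nat) : Int)) (PySem.Set.ofList v)]
  rw [← pv_ofList_filter, PySem.Set.ofList_ofList]
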